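-- pv_equiv track=rewrite | github.com/gukihuman/algorithms-python-hiryanov | Lecture_09_sorts/G_0.1.py | convert
-- ===== SOURCE A (Python) =====
-- def convert(A):
--     """Deletes symbols in a list after dot including dot"""
--     B = []
--     for i in A:
--         if i == '.':
--             break
--         B.append(i)
--     C = ''.join(B)
--     return C
-- ===== SOURCE B (Python) =====
-- def convert(A):
--     """Deletes symbols in a list after dot including dot"""
--     try:
--         idx = A.index('.')
--     except ValueError:
--         idx = len(A)
--     return ''.join(A[:idx])
-- ===== Notes on version B (the rewrite author's own statement) =====
-- stated objective: simpler
-- what changed: Replaces the accumulate-while-scanning-with-break loop by finding the index of the first '.' (len(A) if absent) and joining the slice before it.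
import Mathlib
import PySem

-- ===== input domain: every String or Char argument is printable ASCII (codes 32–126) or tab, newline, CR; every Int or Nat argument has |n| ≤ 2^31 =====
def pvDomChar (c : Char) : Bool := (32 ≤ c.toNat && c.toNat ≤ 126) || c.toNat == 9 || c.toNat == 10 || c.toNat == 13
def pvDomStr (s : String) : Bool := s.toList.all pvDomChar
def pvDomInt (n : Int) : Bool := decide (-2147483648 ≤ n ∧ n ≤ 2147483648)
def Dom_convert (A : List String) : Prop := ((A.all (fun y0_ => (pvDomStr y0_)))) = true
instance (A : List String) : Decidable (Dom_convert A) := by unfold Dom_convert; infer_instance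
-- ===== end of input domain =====

-- B replaces A's accumulate-until-dot loop by find-the-dot-index then slice-and-join (simpler decomposition, same cost).

-- ===== PORT A =====
-- the for-loop with break, carrying the accumulator B
def convertLoop : List String → List String → List String
  | [], B => B
  | i :: t, B => if i = "." then B else convertLoop t (B ++ [i])

def convert (A : List String) : String :=
  PySem.Str.join "" (convertLoop A [])

-- ===== PORT B =====
def convert_alt (A : List String) : String :=
  let idx := match PySem.List.index? A "." with
    | some k => k
    | none => A.length
  PySem.Str.join "" (A.take idx)

-- ===== PRECONDITION & SPEC =====
def Spec_convert (A : List String) (out : String) : Prop := out = convert_alt A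
instance (A : List String) (out : String) : Decidable (Spec_convert A out) := by unfold Spec_convert; infer_instance

-- ===== CLAIM (what is proved, stated in full; the proofs are below) =====
def Claim_equal_convert : Prop := ∀ (A : List String), Dom_convert A → Spec_convert A (convert A)

-- ===== LEMMAS AND PROOFS =====
def convPref (l : List String) : List String :=
  match PySem.List.index? l "." with
  | some k => l.take k
  | none => l.take l.length

theorem convertLoop_eq_pref : ∀ (l B : List String), convertLoop l B = B ++ convPref l := by
  intro l
  induction l with
  | nil => intro B; simp [convertLoop, convPref, PySem.List.index?]
  | cons i t ih =>
    intro B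
    by_cases h : i = "."
    · subst h
      rw [convertLoop]
      simp [convPref, List.idxOf?_cons]
    · rw [convertLoop]
      simp only [if_neg h]
      rw [ih]
      simp only [convPref, PySem.List.index?_eq_idxOf?, List.idxOf?_cons]
      cases hk : List.idxOf? "." t with
      | none => simp [h]
      | some k => simp [h]

-- ===== VERDICT (by name: the statement is the Claim_ definition above) =====
theorem convert_spec : Claim_equal_convert := by
  intro A _
  unfold Spec_convert convert convert_alt
  rw [convertLoop_eq_pref]
  simp only [convPref, PySem.List.index?_eq_idxOf?]
  cases hk : List.idxOf? "." A with
  | none => simp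
  | some k => simp
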